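-- pv_equiv track=rewrite | github.com/Veirya/MahjongTracker | Util/InputFrame.py | mpsz_valid
-- ===== SOURCE A (Python) =====
-- def mpsz_valid(string):
--     string = string.lower()
--     valLetters = 0; digs = 0;
--     if not string[-1].isnumeric():
--         return False
--     for i,l in enumerate(string):
--         if l in set('mpszb'):
--             valLetters += 1
--             if not string[i+1].isnumeric():
--                 return False
--         elif l.isnumeric():
--             digs += 1
--         elif l != ' ':
--             return False
--         # end if
--     # end for
--     return False if valLetters > digs else True
-- ===== SOURCE B (Python) =====
-- def mpsz_valid(string):
--     string = string.lower()
--     if not string[-1].isnumeric():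
--         return False
--     # Token-consuming scan, no counters: a suit letter must pair with the digit
--     # right after it, and the pair is consumed together.  Each letter thereby
--     # claims its own distinct digit, so A's final letters-vs-digits count
--     # comparison is automatically satisfied and disappears.
--     i = 0
--     n = len(string)
--     while i < n:
--         c = string[i]
--         if c in 'mpszb':
--             if not string[i + 1].isnumeric():
--                 return False
--             i += 2
--         elif c.isnumeric() or c == ' ':
--             i += 1
--         else:
--             return False
--     return True
-- ===== Notes on version B (the rewrite author's own statement) =====
-- stated objective: alternative
-- what changed: A's counter-based scan (running valLetters/digs plus a final letters<=digits comparison) is replaced by a counter-free token-consuming scan that pairs each suit letter with the digit right after it and consumes the pair together; since each letter thereby claims its own distinct following digit, the final count comparison is provably redundant and disappears.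
-- outside the precondition, e.g. on mpsz_valid(''): A raises IndexError, B raises IndexError
import Mathlib
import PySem

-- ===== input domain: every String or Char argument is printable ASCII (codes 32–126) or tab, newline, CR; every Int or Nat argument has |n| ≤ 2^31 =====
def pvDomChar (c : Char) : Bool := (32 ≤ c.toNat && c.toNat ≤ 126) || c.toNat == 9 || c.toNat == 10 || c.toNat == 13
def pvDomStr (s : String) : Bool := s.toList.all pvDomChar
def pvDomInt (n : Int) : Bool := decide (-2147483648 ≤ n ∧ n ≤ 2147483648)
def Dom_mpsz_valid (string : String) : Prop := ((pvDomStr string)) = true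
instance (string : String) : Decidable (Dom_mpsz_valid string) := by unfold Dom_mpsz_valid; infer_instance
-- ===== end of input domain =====

-- B drops A's letter/digit counters and final comparison: a token-consuming scan pairs each
-- suit letter with the digit after it, which makes the count check automatic (objective: alternative).

-- ===== PORT A =====
-- the loop of A: state (valLetters, digs), index i into the original list
def mpszLoopA : List Char → Nat → List Char → Int → Int → Bool
  | [], _, _, valLetters, digs => if valLetters > digs then false else true
  | l :: rest, i, orig, valLetters, digs =>
    if l = 'm' ∨ l = 'p' ∨ l = 's' ∨ l = 'z' ∨ l = 'b' then
      match PySem.List.pyGet? orig ((i : Int) + 1) with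
      | some c =>
        if ¬ PySem.Chars.isdigit c then false
        else mpszLoopA rest (i + 1) orig (valLetters + 1) digs
      | none => false  -- IndexError; unreachable once string[-1] is numeric
    else if PySem.Chars.isdigit l then mpszLoopA rest (i + 1) orig valLetters (digs + 1)
    else if l ≠ ' ' then false
    else mpszLoopA rest (i + 1) orig valLetters digs

def mpsz_valid (string : String) : Bool :=
  let s := (PySem.Str.lower string).toList
  match PySem.List.pyGet? s (-1) with
  | none => false  -- Python raises IndexError here (empty string); excluded by Pre_
  | some c => if ¬ PySem.Chars.isdigit c then false else mpszLoopA s 0 s 0 0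

-- ===== PORT B =====
-- B's while loop over index i, as the structural recursion on the remaining suffix:
-- a letter consumes itself and the following digit, anything else consumes one char.
def mpszTokB : List Char → Bool
  | [] => true
  | c :: rest =>
    if c = 'm' ∨ c = 'p' ∨ c = 's' ∨ c = 'z' ∨ c = 'b' then
      match rest with
      | [] => false  -- string[i+1] IndexError; unreachable once string[-1] is numeric
      | d :: rest' => if ¬ PySem.Chars.isdigit d then false else mpszTokB rest'
    else if PySem.Chars.isdigit c || c = ' ' then mpszTokB rest
    else false

def mpsz_valid_alt (string : String) : Bool :=
  let s := (PySem.Str.lower string).toList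
  match PySem.List.pyGet? s (-1) with
  | none => false  -- Python raises IndexError here (empty string); excluded by Pre_
  | some c => if ¬ PySem.Chars.isdigit c then false else mpszTokB s

-- ===== PRECONDITION & SPEC =====
-- Pre_ excludes only the empty string, on which both Pythons raise IndexError at string[-1].
def Pre_mpsz_valid (string : String) : Prop := string ≠ ""
instance (string : String) : Decidable (Pre_mpsz_valid string) := by unfold Pre_mpsz_valid; infer_instance
def pvWitness_mpsz_valid : String := "m1p2"

def Spec_mpsz_valid (string : String) (out : Bool) : Prop := out = mpsz_valid_alt string
instance (string : String) (out : Bool) : Decidable (Spec_mpsz_valid string out) := by unfold Spec_mpsz_valid; infer_instance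

-- ===== CLAIM (what is proved, stated in full; the proofs are below) =====
def Claim_equal_mpsz_valid : Prop := ∀ (string : String), Dom_mpsz_valid string → Pre_mpsz_valid string → Spec_mpsz_valid string (mpsz_valid string)

-- ===== LEMMAS AND PROOFS =====

lemma isLet_not_digit {a : Char} (h : a = 'm' ∨ a = 'p' ∨ a = 's' ∨ a = 'z' ∨ a = 'b') :
    PySem.Chars.isdigit a = false := by
  rcases h with h | h | h | h | h <;> subst h <;> decide

-- Main invariant: A's loop over a suffix cs (index pre.length into pre ++ cs) agrees with B's
-- token scan of cs, provided the string's last char is a digit and valLetters ≤ digs so far.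
-- definitional unfoldings of B's scan (the compiler splits the cons case on the tail)
lemma tokB_one (c : Char) :
    mpszTokB [c] =
      if c = 'm' ∨ c = 'p' ∨ c = 's' ∨ c = 'z' ∨ c = 'b' then false
      else if PySem.Chars.isdigit c || c = ' ' then mpszTokB [] else false := rfl

lemma tokB_two (c d : Char) (rest' : List Char) :
    mpszTokB (c :: d :: rest') =
      if c = 'm' ∨ c = 'p' ∨ c = 's' ∨ c = 'z' ∨ c = 'b' then
        (if ¬ PySem.Chars.isdigit d then false else mpszTokB rest')
      else if PySem.Chars.isdigit c || c = ' ' then mpszTokB (d :: rest') else false := rfl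

lemma tokB_cons_notlet (c : Char) (rest : List Char)
    (h : ¬ (c = 'm' ∨ c = 'p' ∨ c = 's' ∨ c = 'z' ∨ c = 'b')) :
    mpszTokB (c :: rest) =
      if PySem.Chars.isdigit c || c = ' ' then mpszTokB rest else false := by
  cases rest with
  | nil => rw [tokB_one, if_neg h]
  | cons y ys => rw [tokB_two, if_neg h]

-- Main invariant: A's loop over a suffix cs (index pre.length into pre ++ cs) agrees with B's
-- token scan of cs, provided the string's last char is a digit and valLetters ≤ digs so far.
lemma loopA_eq_tok (cs : List Char) : ∀ (pre : List Char) (v d : Int),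
    (∀ c, cs.getLast? = some c → PySem.Chars.isdigit c = true) → v ≤ d →
    mpszLoopA cs pre.length (pre ++ cs) v d = mpszTokB cs := by
  induction cs using mpszTokB.induct with
  | case1 =>
    intro pre v d _ hvd
    simp [mpszLoopA, mpszTokB]
    omega
  | case2 l hlet =>
    -- letter is the last char: A's string[i+1] lookup is out of range → false; B → false
    intro pre v d _ _
    rw [mpszLoopA, if_pos hlet]
    have hnone : PySem.List.pyGet? (pre ++ [l]) ((pre.length : Int) + 1) = none := by
      have h := PySem.List.pyGet?_append_right (pre := pre) (ys := [l]) (k := 1)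
      simpa using h
    rw [hnone]
    show false = mpszTokB [l]
    rw [tokB_one, if_pos hlet]
  | case3 l hlet dg rest' hnd =>
    -- letter followed by a non-digit: both return false
    intro pre v d _ _
    have hidx : PySem.List.pyGet? (pre ++ l :: dg :: rest') ((pre.length : Int) + 1)
        = some dg := by
      have h := PySem.List.pyGet?_append_right (pre := pre) (ys := l :: dg :: rest') (k := 1)
      simpa using h
    rw [mpszLoopA, if_pos hlet, hidx]
    show (if ¬ PySem.Chars.isdigit dg = true then false
          else mpszLoopA (dg :: rest') (pre.length + 1) (pre ++ l :: dg :: rest') (v + 1) d)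
        = mpszTokB (l :: dg :: rest')
    rw [if_pos hnd, tokB_two, if_pos hlet, if_pos hnd]
  | case4 l hlet dg rest' hnnd ih =>
    -- letter followed by a digit: A does two steps, B consumes the pair at once
    intro pre v d hlast hvd
    have hdg : PySem.Chars.isdigit dg = true := by
      by_cases h : PySem.Chars.isdigit dg = true
      · exact h
      · exact absurd h hnnd
    have hidx : PySem.List.pyGet? (pre ++ l :: dg :: rest') ((pre.length : Int) + 1)
        = some dg := by
      have h := PySem.List.pyGet?_append_right (pre := pre) (ys := l :: dg :: rest') (k := 1)
      simpa using h
    rw [mpszLoopA, if_pos hlet, hidx]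
    show (if ¬ PySem.Chars.isdigit dg = true then false
          else mpszLoopA (dg :: rest') (pre.length + 1) (pre ++ l :: dg :: rest') (v + 1) d)
        = mpszTokB (l :: dg :: rest')
    have hdnotlet : ¬ (dg = 'm' ∨ dg = 'p' ∨ dg = 's' ∨ dg = 'z' ∨ dg = 'b') := by
      intro h; rw [isLet_not_digit h] at hdg; exact absurd hdg (by simp)
    rw [if_neg (by simp [hdg]), mpszLoopA, if_neg hdnotlet, if_pos hdg]
    have hrec := ih (pre ++ [l, dg]) (v + 1) (d + 1)
      (by intro x hx
          cases rest' with
          | nil => exact absurd hx (by simp)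
          | cons y ys => exact hlast x (by simpa using hx))
      (by omega)
    have e1 : (pre ++ [l, dg]).length = pre.length + 1 + 1 := by simp
    have e2 : pre ++ [l, dg] ++ rest' = pre ++ l :: dg :: rest' := by simp
    rw [e1, e2] at hrec
    rw [hrec, tokB_two, if_pos hlet, if_neg (by simp [hdg])]
  | case5 c rest hlet hok ih =>
    -- a digit or a space: one step on both sides
    intro pre v d hlast hvd
    rw [mpszLoopA, if_neg hlet]
    have hlast' : ∀ x, rest.getLast? = some x → PySem.Chars.isdigit x = true := by
      intro x hx
      cases rest with
      | nil => exact absurd hx (by simp)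
      | cons y ys => exact hlast x (by simpa using hx)
    by_cases hdig : PySem.Chars.isdigit c = true
    · have hrec := ih (pre ++ [c]) v (d + 1) hlast' (by omega)
      have e1 : (pre ++ [c]).length = pre.length + 1 := by simp
      have e2 : pre ++ [c] ++ rest = pre ++ c :: rest := by simp
      rw [e1, e2] at hrec
      rw [if_pos hdig, hrec, tokB_cons_notlet c rest hlet, if_pos (by simp [hdig])]
    · have hsp : c = ' ' := by
        rcases Bool.or_eq_true_iff.mp hok with h | h
        · exact absurd h hdig
        · exact of_decide_eq_true h
      subst hsp
      have hrec := ih (pre ++ [' ']) v d hlast' hvd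
      have e1 : (pre ++ [' ']).length = pre.length + 1 := by simp
      have e2 : pre ++ [' '] ++ rest = pre ++ ' ' :: rest := by simp
      rw [e1, e2] at hrec
      rw [if_neg hdig, if_neg (by simp), hrec, tokB_cons_notlet ' ' rest hlet,
        if_pos (by simp)]
  | case6 c rest hlet hbad =>
    -- an invalid character: both return false
    intro pre v d _ _
    have hdig : ¬ PySem.Chars.isdigit c = true := by
      intro h; exact hbad (by simp [h])
    have hsp : c ≠ ' ' := by
      intro h; exact hbad (by simp [h])
    rw [mpszLoopA, if_neg hlet, if_neg hdig, if_pos hsp, tokB_cons_notlet c rest hlet,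
      if_neg hbad]

-- ===== VERDICT (by name: the statement is the Claim_ definition above) =====
theorem mpsz_valid_spec : Claim_equal_mpsz_valid := by
  intro string _ _
  unfold Spec_mpsz_valid mpsz_valid mpsz_valid_alt
  cases hg : PySem.List.pyGet? (PySem.Str.lower string).toList (-1) with
  | none => simp only [hg]
  | some c =>
    simp only [hg]
    by_cases hc : PySem.Chars.isdigit c
    · have hlast : ((PySem.Str.lower string).toList).getLast? = some c := by
        rw [← PySem.List.pyGet?_neg_one]; exact hg
      have h := loopA_eq_tok (PySem.Str.lower string).toList [] 0 0
        (fun x hx => by rw [hlast] at hx; cases hx; exact hc) le_rfl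
      simp only [List.length_nil, List.nil_append] at h
      rw [if_neg (by simp [hc]), if_neg (by simp [hc]), h]
    · rw [if_pos hc, if_pos hc]
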